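-- pv_equiv track=rewrite | github.com/Digital-AI-Finance/data-science | archived_scripts/extract_all_charts_L01_L06.py | color_replace
-- ===== SOURCE A (Python) =====
-- def color_replace(code):
--     """Replace color hex codes with variable names and old variables"""
--     replacements = [
--         ("'#9B7EBD'", "COLOR_PRIMARY"),
--         ("'#6B5B95'", "COLOR_SECONDARY"),
--         ("'#4A90E2'", "COLOR_ACCENT"),
--         ("'#ADADE0'", "COLOR_LIGHT"),
--         ("'#44A05B'", "COLOR_GREEN"),
--         ("'#FF7F0E'", "COLOR_ORANGE"),
--         ("'#D62728'", "COLOR_RED"),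
--         ("'#808080'", "'#808080'"),  # Keep gray
--         ("'white'", "'white'"),
--         ("'black'", "'black'"),
--     ]
--
--     for old, new in replacements:
--         code = code.replace(old, new)
--
--     return code
-- ===== SOURCE B (Python) =====
-- def color_replace(code):
--     """Replace color hex codes with variable names and old variables"""
--     table = [
--         ("'#9B7EBD'", "COLOR_PRIMARY"),
--         ("'#6B5B95'", "COLOR_SECONDARY"),
--         ("'#4A90E2'", "COLOR_ACCENT"),
--         ("'#ADADE0'", "COLOR_LIGHT"),
--         ("'#44A05B'", "COLOR_GREEN"),
--         ("'#FF7F0E'", "COLOR_ORANGE"),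
--         ("'#D62728'", "COLOR_RED"),
--     ]
--     out = []
--     i = 0
--     n = len(code)
--     while i < n:
--         for old, new in table:
--             if code.startswith(old, i):
--                 out.append(new)
--                 i += len(old)
--                 break
--         else:
--             out.append(code[i])
--             i += 1
--     return ''.join(out)
-- ===== Notes on version B (the rewrite author's own statement) =====
-- stated objective: alternative
-- what changed: One left-to-right scan that at each position substitutes the first matching literal from a 7-entry table (identity no-op entries dropped), instead of ten sequential full-string .replace passes.
-- outside the precondition, e.g. on color_replace("'#6B5B95'#9B7EBD'"): A returns "'#6B5B95COLOR_PRIMARY", B returns "COLOR_SECONDARY#9B7EBD'"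
import Mathlib
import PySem

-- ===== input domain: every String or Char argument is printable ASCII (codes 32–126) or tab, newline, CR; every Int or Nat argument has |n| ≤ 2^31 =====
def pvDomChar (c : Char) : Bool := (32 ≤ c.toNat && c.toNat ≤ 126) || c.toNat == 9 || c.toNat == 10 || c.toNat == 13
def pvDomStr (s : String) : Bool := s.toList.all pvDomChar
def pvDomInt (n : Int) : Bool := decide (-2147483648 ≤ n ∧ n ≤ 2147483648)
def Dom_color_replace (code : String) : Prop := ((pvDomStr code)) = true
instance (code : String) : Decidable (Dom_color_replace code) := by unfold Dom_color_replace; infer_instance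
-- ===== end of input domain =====

-- B replaces A's ten sequential full-string .replace passes by one left-to-right scan with a
-- first-match 7-entry table (identity entries dropped); equal on Pre_ (no overlapping literals).

-- ===== PORT A =====
-- the Python replacement list, in order (including the three identity pairs)
def replacementsA : List (String × String) :=
  [("'#9B7EBD'", "COLOR_PRIMARY"),
   ("'#6B5B95'", "COLOR_SECONDARY"),
   ("'#4A90E2'", "COLOR_ACCENT"),
   ("'#ADADE0'", "COLOR_LIGHT"),
   ("'#44A05B'", "COLOR_GREEN"),
   ("'#FF7F0E'", "COLOR_ORANGE"),
   ("'#D62728'", "COLOR_RED"),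
   ("'#808080'", "'#808080'"),
   ("'white'", "'white'"),
   ("'black'", "'black'")]

-- for old, new in replacements: code = code.replace(old, new)
def color_replace (code : String) : String :=
  replacementsA.foldl (fun s kv => PySem.Str.replace s kv.1 kv.2) code

-- ===== PORT B =====
-- B's table: only the seven literals that actually change, as char lists
def tableB : List (List Char × List Char) :=
  [("'#9B7EBD'".toList, "COLOR_PRIMARY".toList),
   ("'#6B5B95'".toList, "COLOR_SECONDARY".toList),
   ("'#4A90E2'".toList, "COLOR_ACCENT".toList),
   ("'#ADADE0'".toList, "COLOR_LIGHT".toList),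
   ("'#44A05B'".toList, "COLOR_GREEN".toList),
   ("'#FF7F0E'".toList, "COLOR_ORANGE".toList),
   ("'#D62728'".toList, "COLOR_RED".toList)]

-- the inner for-with-break: first table entry whose key starts at the current position
def findRepB (l : List Char) : Option (List Char × List Char) :=
  tableB.find? (fun kv => kv.1.isPrefixOf l)

-- the while loop: one pass over the characters, emitting a replacement or copying one char
def passB : List Char → List Char
  | [] => []
  | c :: t =>
    match findRepB (c :: t) with
    | some kv => kv.2 ++ passB (t.drop (kv.1.length - 1))
    | none => c :: passB t
termination_by l => l.length
decreasing_by
  · simp only [List.length_cons]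
    have : (t.drop (kv.1.length - 1)).length ≤ t.length := by
      simp [List.length_drop]
    omega
  · simp

def color_replace_alt (code : String) : String := String.ofList (passB code.toList)

-- ===== PRECONDITION & SPEC =====
-- Pre_ excludes strings in which two of the seven color literals OVERLAP (the closing quote of
-- one serving as the opening quote of the next): there A's result depends on the accidental
-- order of its replacement list, and B's single left-to-right pass is as defensible as A's cascade.
def overlapPats : List String :=
  ["'#9B7EBD'#9B7EBD'", "'#9B7EBD'#6B5B95'", "'#9B7EBD'#4A90E2'", "'#9B7EBD'#ADADE0'",
   "'#9B7EBD'#44A05B'", "'#9B7EBD'#FF7F0E'", "'#9B7EBD'#D62728'",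
   "'#6B5B95'#9B7EBD'", "'#6B5B95'#6B5B95'", "'#6B5B95'#4A90E2'", "'#6B5B95'#ADADE0'",
   "'#6B5B95'#44A05B'", "'#6B5B95'#FF7F0E'", "'#6B5B95'#D62728'",
   "'#4A90E2'#9B7EBD'", "'#4A90E2'#6B5B95'", "'#4A90E2'#4A90E2'", "'#4A90E2'#ADADE0'",
   "'#4A90E2'#44A05B'", "'#4A90E2'#FF7F0E'", "'#4A90E2'#D62728'",
   "'#ADADE0'#9B7EBD'", "'#ADADE0'#6B5B95'", "'#ADADE0'#4A90E2'", "'#ADADE0'#ADADE0'",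
   "'#ADADE0'#44A05B'", "'#ADADE0'#FF7F0E'", "'#ADADE0'#D62728'",
   "'#44A05B'#9B7EBD'", "'#44A05B'#6B5B95'", "'#44A05B'#4A90E2'", "'#44A05B'#ADADE0'",
   "'#44A05B'#44A05B'", "'#44A05B'#FF7F0E'", "'#44A05B'#D62728'",
   "'#FF7F0E'#9B7EBD'", "'#FF7F0E'#6B5B95'", "'#FF7F0E'#4A90E2'", "'#FF7F0E'#ADADE0'",
   "'#FF7F0E'#44A05B'", "'#FF7F0E'#FF7F0E'", "'#FF7F0E'#D62728'",
   "'#D62728'#9B7EBD'", "'#D62728'#6B5B95'", "'#D62728'#4A90E2'", "'#D62728'#ADADE0'",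
   "'#D62728'#44A05B'", "'#D62728'#FF7F0E'", "'#D62728'#D62728'"]

def Pre_color_replace (code : String) : Prop :=
  ∀ p ∈ overlapPats, PySem.Str.isIn p code = false
instance (code : String) : Decidable (Pre_color_replace code) := by
  unfold Pre_color_replace; infer_instance

def pvWitness_color_replace : String := "ax.plot(x, y, color='#9B7EBD', lw=2)"

def Spec_color_replace (code : String) (out : String) : Prop := out = color_replace_alt code
instance (code : String) (out : String) : Decidable (Spec_color_replace code out) := by
  unfold Spec_color_replace; infer_instance

-- ===== CLAIM (what is proved, stated in full; the proofs are below) =====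
def Claim_equal_color_replace : Prop :=
  ∀ (code : String), Dom_color_replace code → Pre_color_replace code →
    Spec_color_replace code (color_replace code)

-- ===== LEMMAS AND PROOFS =====

-- quote character
def qCh : Char := '\''

-- structural-recursion version of Python's str.replace (for nonempty old)
def repc (k v : List Char) : List Char → List Char
  | [] => []
  | c :: t =>
    if k.isPrefixOf (c :: t) then v ++ repc k v (t.drop (k.length - 1))
    else c :: repc k v t
termination_by l => l.length
decreasing_by
  · simp only [List.length_cons]
    have : (t.drop (k.length - 1)).length ≤ t.length := by
      simp [List.length_drop]
    omega
  · simp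

def foldRep (T : List (List Char × List Char)) (l : List Char) : List Char :=
  T.foldl (fun s kv => repc kv.1 kv.2 s) l

-- shape of a table entry: key = '…' of length 9, no interior quote; value quote-free, ≥ 8 chars
def GoodKV (kv : List Char × List Char) : Prop :=
  (∃ m, kv.1 = qCh :: m ++ [qCh] ∧ m.length = 7 ∧ qCh ∉ m) ∧ qCh ∉ kv.2 ∧ 8 ≤ kv.2.length

theorem goodAll : ∀ kv ∈ tableB, GoodKV kv := by
  intro kv h
  simp only [tableB, List.mem_cons, List.not_mem_nil, or_false] at h
  rcases h with h | h | h | h | h | h | h <;> subst h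
  · exact ⟨⟨"#9B7EBD".toList, by decide, by decide, by decide⟩, by decide, by decide⟩
  · exact ⟨⟨"#6B5B95".toList, by decide, by decide, by decide⟩, by decide, by decide⟩
  · exact ⟨⟨"#4A90E2".toList, by decide, by decide, by decide⟩, by decide, by decide⟩
  · exact ⟨⟨"#ADADE0".toList, by decide, by decide, by decide⟩, by decide, by decide⟩
  · exact ⟨⟨"#44A05B".toList, by decide, by decide, by decide⟩, by decide, by decide⟩
  · exact ⟨⟨"#FF7F0E".toList, by decide, by decide, by decide⟩, by decide, by decide⟩
  · exact ⟨⟨"#D62728".toList, by decide, by decide, by decide⟩, by decide, by decide⟩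

-- unfolding equations for repc
theorem repc_nil (k v : List Char) : repc k v [] = [] := by
  simp [repc]

theorem repc_cons_pos {k : List Char} (v : List Char) {c : Char} {t : List Char}
    (h : k <+: c :: t) :
    repc k v (c :: t) = v ++ repc k v (t.drop (k.length - 1)) := by
  rw [repc, if_pos (List.isPrefixOf_iff_prefix.mpr h)]

theorem repc_cons_neg {k : List Char} (v : List Char) {c : Char} {t : List Char}
    (h : ¬ k <+: c :: t) :
    repc k v (c :: t) = c :: repc k v t := by
  rw [repc, if_neg (fun hb => h (List.isPrefixOf_iff_prefix.mp hb))]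

-- bridge: PySem.Chars.replace = repc for nonempty old
theorem go_eq (old new : List Char) (hold : old ≠ []) :
    ∀ (fuel : Nat) (l acc : List Char), l.length ≤ fuel →
      PySem.Chars.replace.go old new fuel l acc = acc.reverse ++ repc old new l := by
  intro fuel
  induction fuel with
  | zero =>
    intro l acc hl
    have : l = [] := List.eq_nil_of_length_eq_zero (Nat.le_zero.mp hl)
    subst this
    rw [PySem.Chars.replace.go.eq_def]
    simp [repc_nil]
  | succ n ih =>
    intro l acc hl
    cases l with
    | nil => rw [PySem.Chars.replace.go.eq_def]; simp [repc_nil]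
    | cons c t =>
      rw [PySem.Chars.replace.go.eq_def]
      simp only []
      by_cases hp : old.isPrefixOf (c :: t)
      · rw [if_pos hp]
        obtain ⟨o, old', rfl⟩ : ∃ o old', old = o :: old' := by
          cases old with
          | nil => exact absurd rfl hold
          | cons o old' => exact ⟨o, old', rfl⟩
        have hdrop : List.drop (o :: old').length (c :: t) = t.drop ((o :: old').length - 1) := by
          simp
        have hlen : (List.drop (o :: old').length (c :: t)).length ≤ n := by
          simp only [List.length_drop, List.length_cons] at *
          omega
        rw [ih _ _ hlen, hdrop, repc_cons_pos _ (List.isPrefixOf_iff_prefix.mp hp)]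
        simp
      · rw [if_neg hp]
        have hlen : t.length ≤ n := by simp only [List.length_cons] at hl; omega
        rw [ih _ _ hlen, repc_cons_neg _ (fun h => hp (List.isPrefixOf_iff_prefix.mpr h))]
        simp

theorem replace_eq_repc (l old new : List Char) (hold : old ≠ []) :
    PySem.Chars.replace l old new = repc old new l := by
  unfold PySem.Chars.replace
  rw [if_neg (by simp [List.isEmpty_iff, hold])]
  rw [go_eq old new hold l.length l [] (le_refl _)]
  simp

-- identity replacement is a no-op
theorem repc_id (k : List Char) (hk : k ≠ []) : ∀ l, repc k k l = l := by
  have main : ∀ n l, l.length ≤ n → repc k k l = l := by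
    intro n
    induction n with
    | zero =>
      intro l hl
      have : l = [] := List.eq_nil_of_length_eq_zero (Nat.le_zero.mp hl)
      subst this; exact repc_nil k k
    | succ n ih =>
      intro l hl
      cases l with
      | nil => exact repc_nil k k
      | cons c t =>
        by_cases hp : k <+: c :: t
        · rw [repc_cons_pos _ hp]
          have hk1 : 1 ≤ k.length := by
            cases k with
            | nil => exact absurd rfl hk
            | cons _ _ => simp
          have hdrop : t.drop (k.length - 1) = List.drop k.length (c :: t) := by
            cases k with
            | nil => exact absurd rfl hk
            | cons _ _ => simp
          have hlen : (t.drop (k.length - 1)).length ≤ n := by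
            simp only [List.length_drop, List.length_cons] at *
            omega
          rw [ih _ hlen, hdrop]
          exact List.prefix_iff_eq_append.mp hp
        · rw [repc_cons_neg _ hp]
          have hlen : t.length ≤ n := by simp only [List.length_cons] at hl; omega
          rw [ih _ hlen]
  exact fun l => main l.length l (le_refl _)

-- stepping through quote-free characters
theorem repc_walk {k' : List Char} (v' : List Char) (hk : k'.head? = some qCh) :
    ∀ (m y : List Char), qCh ∉ m → repc k' v' (m ++ y) = m ++ repc k' v' y := by
  intro m
  induction m with
  | nil => intro y _; simp
  | cons c m' ih =>
    intro y hm
    have hc : c ≠ qCh := fun h => hm (h ▸ List.mem_cons_self ..)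
    obtain ⟨k0, krest, rfl⟩ : ∃ k0 krest, k' = k0 :: krest := by
      cases k' with
      | nil => simp at hk
      | cons k0 krest => exact ⟨k0, krest, rfl⟩
    have hk0 : k0 = qCh := by simpa using hk
    have hnp : ¬ (k0 :: krest) <+: c :: (m' ++ y) := by
      intro hp
      rcases List.cons_prefix_cons.mp hp with ⟨h1, _⟩
      exact hc (h1.symm.trans hk0)
    rw [List.cons_append, repc_cons_neg _ hnp, ih y (fun h => hm (List.mem_cons_of_mem _ h))]
    simp

-- CORE: a quote-terminated short pattern found in the output was already in the input
theorem repc_core {k v : List Char} (hv : qCh ∉ v) (hvlen : 8 ≤ v.length) :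
    ∀ (r s : List Char), s ≠ [] → s.getLast? = some qCh → s.length ≤ 8 →
      s <+: repc k v r → s <+: r := by
  have main : ∀ (n : Nat) (r s : List Char), r.length ≤ n → s ≠ [] → s.getLast? = some qCh →
      s.length ≤ 8 → s <+: repc k v r → s <+: r := by
    intro n
    induction n with
    | zero =>
      intro r s hr hne _ _ hs
      have : r = [] := List.eq_nil_of_length_eq_zero (Nat.le_zero.mp hr)
      subst this
      rw [repc_nil] at hs
      exact absurd (List.prefix_nil.mp hs) hne
    | succ n ih =>
      intro r s hr hne hlast hslen hs
      cases r with
      | nil =>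
        rw [repc_nil] at hs
        exact absurd (List.prefix_nil.mp hs) hne
      | cons c t =>
        by_cases hp : k <+: c :: t
        · rw [repc_cons_pos _ hp] at hs
          exfalso
          have hsv : s <+: v := by
            have h1 := List.prefix_iff_eq_take.mp hs
            rw [List.take_append_of_le_length (le_trans hslen hvlen)] at h1
            exact h1 ▸ List.take_prefix s.length v
          have hq : qCh ∈ s := List.mem_of_mem_getLast? (by rw [hlast]; rfl)
          exact hv (hsv.subset hq)
        · rw [repc_cons_neg _ hp] at hs
          cases s with
          | nil => exact absurd rfl hne
          | cons a s' =>
            rcases List.cons_prefix_cons.mp hs with ⟨rfl, hs'⟩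
            cases s' with
            | nil => exact List.cons_prefix_cons.mpr ⟨rfl, List.nil_prefix⟩
            | cons b s'' =>
              have hlen : t.length ≤ n := by simp only [List.length_cons] at hr; omega
              have hlast' : (b :: s'').getLast? = some qCh := by
                rwa [List.getLast?_cons_cons] at hlast
              have hslen' : (b :: s'').length ≤ 8 := by
                simp only [List.length_cons] at *; omega
              exact List.cons_prefix_cons.mpr
                ⟨rfl, ih t (b :: s'') hlen (by simp) hlast' hslen' hs'⟩
  exact fun r s => main r.length r s (le_refl _)

-- a replacement pass over a block `k ++ x` that matches nowhere leaves the block intact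
theorem repc_block {k v k' v' : List Char} (hg : GoodKV (k, v)) (hg' : GoodKV (k', v'))
    (hne : k' ≠ k) (hinv : ¬ k' <+: qCh :: x) :
    repc k' v' (k ++ x) = k ++ repc k' v' x := by
  obtain ⟨⟨m, hkeq, hmlen, hmq⟩, _, _⟩ := hg
  obtain ⟨⟨m', hkeq', _, _⟩, _, _⟩ := hg'
  have hk'eq : k' = qCh :: m' ++ [qCh] := hkeq'
  subst hkeq
  have hhead : k'.head? = some qCh := by rw [hk'eq]; rfl
  have hnp0 : ¬ k' <+: (qCh :: m ++ [qCh]) ++ x := by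
    intro hp
    apply hne
    have hlen : k'.length = (qCh :: m ++ [qCh]).length := by
      rw [hk'eq]; simp; omega
    have := List.prefix_iff_eq_take.mp hp
    rw [this, hlen, List.take_left]
  have step1 : (qCh :: m ++ [qCh]) ++ x = qCh :: (m ++ (qCh :: x)) := by simp
  rw [step1, repc_cons_neg _ (by rw [← step1]; exact hnp0),
      repc_walk v' hhead m (qCh :: x) hmq, repc_cons_neg _ hinv]
  simp

-- invariant preservation: an absent key stays absent at the current position
theorem pres {kv : List Char × List Char} {kj vj : List Char} (hg : GoodKV kv)
    (hgj : GoodKV (kj, vj)) (c : Char) (y : List Char)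
    (h : ¬ kv.1 <+: c :: y) : ¬ kv.1 <+: c :: repc kj vj y := by
  intro hp
  apply h
  obtain ⟨⟨m, hkeq, hmlen, _⟩, _, _⟩ := hg
  obtain ⟨_, hvq, hvlen⟩ := hgj
  rw [hkeq] at hp ⊢
  rcases List.cons_prefix_cons.mp hp with ⟨h1, h2⟩
  have h3 : (m ++ [qCh]) <+: y := by
    refine repc_core hvq hvlen y (m ++ [qCh]) (by simp) (List.getLast?_concat) ?_ h2
    simp [hmlen]
  exact List.cons_prefix_cons.mpr ⟨h1, h3⟩

theorem foldRep_nil (T : List (List Char × List Char)) : foldRep T [] = [] := by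
  induction T with
  | nil => rfl
  | cons kv T' ih => simp only [foldRep, List.foldl_cons, repc_nil]; exact ih

-- chain over a block that no key of T matches at its start
theorem foldRep_block {k v : List Char} (hgk : GoodKV (k, v)) :
    ∀ (T : List (List Char × List Char)) (x : List Char), (∀ kv ∈ T, GoodKV kv) →
      (∀ kv ∈ T, kv.1 ≠ k) → (∀ kv ∈ T, ¬ kv.1 <+: qCh :: x) →
      foldRep T (k ++ x) = k ++ foldRep T x := by
  intro T
  induction T with
  | nil => intro x _ _ _; rfl
  | cons kj T' ih =>
    intro x hgood hne hinv
    have hgj : GoodKV kj := hgood kj (List.mem_cons_self ..)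
    simp only [foldRep, List.foldl_cons]
    have hb : repc kj.1 kj.2 (k ++ x) = k ++ repc kj.1 kj.2 x := by
      exact repc_block hgk (by rw [← Prod.mk.eta (p := kj)] at hgj; exact hgj)
        (hne kj (List.mem_cons_self ..)) (hinv kj (List.mem_cons_self ..))
    rw [hb]
    exact ih (repc kj.1 kj.2 x)
      (fun kv h => hgood kv (List.mem_cons_of_mem _ h))
      (fun kv h => hne kv (List.mem_cons_of_mem _ h))
      (fun kv h => pres (hgood kv (List.mem_cons_of_mem _ h))
        (by rw [← Prod.mk.eta (p := kj)] at hgj; exact hgj) qCh x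
        (hinv kv (List.mem_cons_of_mem _ h)))

-- chain over an emitted quote-free value
theorem foldRep_value {v0 : List Char} (hv0 : qCh ∉ v0) :
    ∀ (T : List (List Char × List Char)) (y : List Char), (∀ kv ∈ T, GoodKV kv) →
      foldRep T (v0 ++ y) = v0 ++ foldRep T y := by
  intro T
  induction T with
  | nil => intro y _; rfl
  | cons kj T' ih =>
    intro y hgood
    have hgj : GoodKV kj := hgood kj (List.mem_cons_self ..)
    obtain ⟨⟨m, hkeq, _, _⟩, _, _⟩ := hgj
    have hhead : kj.1.head? = some qCh := by rw [hkeq]; rfl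
    simp only [foldRep, List.foldl_cons]
    rw [repc_walk kj.2 hhead v0 y hv0]
    exact ih (repc kj.1 kj.2 y) (fun kv h => hgood kv (List.mem_cons_of_mem _ h))

-- chain over a single unmatched character
theorem foldRep_char (c : Char) :
    ∀ (T : List (List Char × List Char)) (y : List Char), (∀ kv ∈ T, GoodKV kv) →
      (∀ kv ∈ T, ¬ kv.1 <+: c :: y) →
      foldRep T (c :: y) = c :: foldRep T y := by
  intro T
  induction T with
  | nil => intro y _ _; rfl
  | cons kj T' ih =>
    intro y hgood hinv
    have hgj : GoodKV kj := hgood kj (List.mem_cons_self ..)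
    simp only [foldRep, List.foldl_cons]
    rw [repc_cons_neg _ (hinv kj (List.mem_cons_self ..))]
    exact ih (repc kj.1 kj.2 y)
      (fun kv h => hgood kv (List.mem_cons_of_mem _ h))
      (fun kv h => pres (hgood kv (List.mem_cons_of_mem _ h))
        (by rw [← Prod.mk.eta (p := kj)] at hgj; exact hgj) c y
        (hinv kv (List.mem_cons_of_mem _ h)))

-- no-overlap condition, list level
def NoOv (l : List Char) : Prop :=
  ∀ kv ∈ tableB, ∀ kv' ∈ tableB, ¬ (kv.1 ++ kv'.1.drop 1) <:+: l

-- MAIN: the sequential cascade equals the single pass on overlap-free input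
theorem main_eq : ∀ l, NoOv l → foldRep tableB l = passB l := by
  intro l
  induction l using passB.induct with
  | case1 =>
    intro _
    rw [foldRep_nil, passB.eq_def]
  | case2 c t kv hfind ih =>
    intro hno
    obtain ⟨hpB, P, S, hsplit, hmiss⟩ := List.find?_eq_some_iff_append.mp hfind
    have hmem : kv ∈ tableB := by
      rw [hsplit]; exact List.mem_append_right _ (List.mem_cons_self ..)
    have hgkv : GoodKV kv := goodAll kv hmem
    obtain ⟨⟨m, hkeq, hmlen, hmq⟩, hvq, hvlen⟩ := hgkv
    have hklen : kv.1.length = 9 := by rw [hkeq]; simp; omega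
    have hkp : kv.1 <+: c :: t := List.isPrefixOf_iff_prefix.mp hpB
    have hct : c :: t = kv.1 ++ t.drop (kv.1.length - 1) := by
      have h1 := List.prefix_iff_eq_append.mp hkp
      have h2 : List.drop kv.1.length (c :: t) = t.drop (kv.1.length - 1) := by
        rw [hklen]; simp
      rw [← h2, h1]
    have hinv : ∀ kv' ∈ tableB, ¬ kv'.1 <+: qCh :: t.drop (kv.1.length - 1) := by
      intro kv' hmem' hp'
      obtain ⟨⟨m', hkeq', _, _⟩, _, _⟩ := goodAll kv' hmem'
      have hp2 : (m' ++ [qCh]) <+: t.drop (kv.1.length - 1) := by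
        rw [hkeq'] at hp'; exact (List.cons_prefix_cons.mp hp').2
      obtain ⟨z, hz⟩ := hp2
      have hpat : (kv.1 ++ kv'.1.drop 1) <+: c :: t := by
        rw [hct, hkeq']
        exact ⟨z, by simp [← hz]⟩
      exact hno kv hmem kv' hmem' hpat.isInfix
    have hgoodP : ∀ a ∈ P, GoodKV a := fun a h =>
      goodAll a (by rw [hsplit]; exact List.mem_append_left _ h)
    have hgoodS : ∀ a ∈ S, GoodKV a := fun a h =>
      goodAll a (by rw [hsplit]; exact List.mem_append_right _ (List.mem_cons_of_mem _ h))
    have hneP : ∀ a ∈ P, a.1 ≠ kv.1 := by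
      intro a h heq
      have hm := hmiss a h
      rw [Bool.not_eq_eq_eq_not, Bool.not_true] at hm
      rw [heq, hpB] at hm
      exact Bool.true_eq_false.mp hm
    have hstep : ∀ X : List Char,
        repc kv.1 kv.2 (kv.1 ++ X) = kv.2 ++ repc kv.1 kv.2 X := by
      intro X
      rw [hkeq]
      have hsplit2 : (qCh :: m ++ [qCh]) ++ X = qCh :: ((m ++ [qCh]) ++ X) := by simp
      rw [hsplit2, repc_cons_pos _ (by rw [← hsplit2]; exact List.prefix_append _ _),
        List.drop_left' (show (m ++ [qCh]).length = (qCh :: m ++ [qCh]).length - 1 by simp)]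
    have hnoR : NoOv (t.drop (kv.1.length - 1)) := by
      intro a ha b hb hinf
      exact hno a ha b hb
        (hinf.trans (List.infix_cons (List.drop_suffix _ t).isInfix))
    calc foldRep tableB (c :: t)
        = foldRep (P ++ kv :: S) (kv.1 ++ t.drop (kv.1.length - 1)) := by
          rw [hsplit, ← hct]
      _ = foldRep (kv :: S) (foldRep P (kv.1 ++ t.drop (kv.1.length - 1))) := by
          simp [foldRep, List.foldl_append]
      _ = foldRep (kv :: S) (kv.1 ++ foldRep P (t.drop (kv.1.length - 1))) := by
          rw [foldRep_block ⟨⟨m, hkeq, hmlen, hmq⟩, hvq, hvlen⟩ P _ hgoodP hneP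
            (fun a h => hinv a (by rw [hsplit]; exact List.mem_append_left _ h))]
      _ = foldRep S (repc kv.1 kv.2 (kv.1 ++ foldRep P (t.drop (kv.1.length - 1)))) := by
          simp [foldRep, List.foldl_cons]
      _ = foldRep S (kv.2 ++ repc kv.1 kv.2 (foldRep P (t.drop (kv.1.length - 1)))) := by
          rw [hstep _]
      _ = kv.2 ++ foldRep S (repc kv.1 kv.2 (foldRep P (t.drop (kv.1.length - 1)))) :=
          foldRep_value hvq S _ hgoodS
      _ = kv.2 ++ foldRep tableB (t.drop (kv.1.length - 1)) := by
          rw [hsplit]; simp [foldRep, List.foldl_append, List.foldl_cons]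
      _ = kv.2 ++ passB (t.drop (kv.1.length - 1)) := by rw [ih hnoR]
      _ = passB (c :: t) := by
          conv_rhs => rw [passB.eq_def]
          simp [hfind]
  | case3 c t hfind ih =>
    intro hno
    have hmiss : ∀ kv ∈ tableB, ¬ kv.1 <+: c :: t := by
      intro kv h hp
      have := List.find?_eq_none.mp hfind kv h
      exact this (List.isPrefixOf_iff_prefix.mpr hp)
    rw [foldRep_char c tableB t goodAll hmiss]
    have hnoT : NoOv t := fun a ha b hb hinf =>
      hno a ha b hb (List.infix_cons hinf)
    rw [ih hnoT]
    conv_rhs => rw [passB.eq_def]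
    simp [hfind]

-- A's String-level fold, moved to char lists
theorem fold_toList : ∀ (T : List (String × String)) (s : String),
    (∀ kv ∈ T, kv.1.toList ≠ []) →
    (T.foldl (fun s kv => PySem.Str.replace s kv.1 kv.2) s).toList
      = foldRep (T.map fun kv => (kv.1.toList, kv.2.toList)) s.toList := by
  intro T
  induction T with
  | nil => intro s _; rfl
  | cons kv T' ih =>
    intro s hne
    simp only [List.foldl_cons, List.map_cons]
    rw [ih (PySem.Str.replace s kv.1 kv.2) (fun a h => hne a (List.mem_cons_of_mem _ h))]
    simp only [foldRep, List.foldl_cons]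
    rw [PySem.Str.toList_replace,
      replace_eq_repc _ _ _ (hne kv (List.mem_cons_self ..))]

theorem mapA : replacementsA.map (fun kv => (kv.1.toList, kv.2.toList)) =
    tableB ++ [("'#808080'".toList, "'#808080'".toList),
               ("'white'".toList, "'white'".toList),
               ("'black'".toList, "'black'".toList)] := by
  rfl

theorem foldRep_ids (l : List Char) :
    foldRep (tableB ++ [("'#808080'".toList, "'#808080'".toList),
               ("'white'".toList, "'white'".toList),
               ("'black'".toList, "'black'".toList)]) l = foldRep tableB l := by
  simp only [foldRep, List.foldl_append, List.foldl_cons, List.foldl_nil]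
  rw [repc_id _ (by decide), repc_id _ (by decide), repc_id _ (by decide)]

theorem pat_exists : ∀ kv ∈ tableB, ∀ kv' ∈ tableB,
    ∃ p ∈ overlapPats, p.toList = kv.1 ++ kv'.1.drop 1 := by
  decide

theorem noOv_of_pre (code : String) (hpre : Pre_color_replace code) :
    NoOv code.toList := by
  intro kv hk kv' hk' hinf
  obtain ⟨p, hp, hpeq⟩ := pat_exists kv hk kv' hk'
  have hfalse := hpre p hp
  rw [← hpeq] at hinf
  rw [(PySem.Str.isIn_iff_infix p code).mpr hinf] at hfalse
  exact Bool.true_eq_false.mp hfalse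

-- ===== VERDICT (by name: the statement is the Claim_ definition above) =====
theorem color_replace_spec : Claim_equal_color_replace := by
  intro code _ hpre
  unfold Spec_color_replace color_replace color_replace_alt
  have h2 : (replacementsA.foldl (fun s kv => PySem.Str.replace s kv.1 kv.2) code).toList
      = passB code.toList := by
    rw [fold_toList replacementsA code (by decide), mapA, foldRep_ids,
      main_eq _ (noOv_of_pre code hpre)]
  calc replacementsA.foldl (fun s kv => PySem.Str.replace s kv.1 kv.2) code
      = String.ofList (replacementsA.foldl
          (fun s kv => PySem.Str.replace s kv.1 kv.2) code).toList :=
        String.ofList_toList.symm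
    _ = String.ofList (passB code.toList) := by rw [h2]
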